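-- pv_equiv track=rewrite | github.com/mk7exe/millerite | Phase2/Second_Neighbors/make_examples_utils.py | struc_code
-- ===== SOURCE A (Python) =====
-- import collections
--
-- UCCodes = [7, 8, 14, 20, 26, 27, 33, 34, 35, 39, 40, 41, 44, 45, 46, 47, 50, 51, 52, 87, 93, 99, 105, 108, 114, 120,
--            123, 126, 129]
--
-- def struc_code(atoms):
--     """function returns a list for an structure including number of each types in UCCodes"""
--     all_bcodes = []
--     struct_code = [0, 0, 0, 0, 0, 0, 0, 0, 0, 0, 0, 0, 0, 0, 0, 0, 0, 0, 0, 0, 0, 0, 0, 0, 0, 0, 0, 0, 0]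
--     for at in atoms:
--         if at[3] != 132 and at[3] != 53:
--             all_bcodes.append(at[3])
--     bcodes = list(collections.Counter(all_bcodes).keys())
--     bnums = list(collections.Counter(all_bcodes).values())
--     for j in range(len(bcodes)):
--         try:
--             index = UCCodes.index(bcodes[j])
--         except ValueError:
--             index = -1
--         if index >= 0:
--             struct_code[index] = bnums[j]
--     return list(struct_code)
-- ===== SOURCE B (Python) =====
-- UCCodes = [7, 8, 14, 20, 26, 27, 33, 34, 35, 39, 40, 41, 44, 45, 46, 47, 50, 51, 52, 87, 93, 99, 105, 108, 114, 120,
--            123, 126, 129]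
--
-- def struc_code(atoms):
--     """Single pass: count each non-132/53 code directly into its UCCodes slot."""
--     pos = {code: i for i, code in enumerate(UCCodes)}
--     struct_code = [0] * 29
--     for at in atoms:
--         if at[3] != 132 and at[3] != 53:
--             i = pos.get(at[3])
--             if i is not None:
--                 struct_code[i] += 1
--     return struct_code
-- ===== Notes on version B (the rewrite author's own statement) =====
-- stated objective: simpler
-- what changed: A's three passes (filter into a list, two Counter constructions, then a placement loop doing UCCodes.index per distinct code) are fused into one pass over atoms that increments the target slot directly, via a position dict built once from UCCodes.
import Mathlib
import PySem

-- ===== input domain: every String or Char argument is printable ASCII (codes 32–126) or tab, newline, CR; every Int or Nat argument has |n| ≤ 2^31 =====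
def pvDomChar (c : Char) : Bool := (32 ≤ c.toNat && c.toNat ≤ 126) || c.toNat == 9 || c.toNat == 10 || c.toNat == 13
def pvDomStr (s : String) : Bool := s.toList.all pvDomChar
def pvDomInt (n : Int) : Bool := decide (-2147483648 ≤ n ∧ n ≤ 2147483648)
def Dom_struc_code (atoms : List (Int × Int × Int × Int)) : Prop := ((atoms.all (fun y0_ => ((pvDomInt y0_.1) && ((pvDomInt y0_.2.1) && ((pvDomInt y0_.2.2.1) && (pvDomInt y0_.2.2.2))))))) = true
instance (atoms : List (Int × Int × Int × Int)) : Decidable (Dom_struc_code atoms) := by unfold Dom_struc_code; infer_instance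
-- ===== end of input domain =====

-- B fuses A's three passes (filter list, two Counter builds, placement loop via UCCodes.index)
-- into one counting pass over atoms using a position dict built once; objective: simpler.

def UCCodes : List Int := [7, 8, 14, 20, 26, 27, 33, 34, 35, 39, 40, 41, 44, 45, 46, 47, 50, 51, 52, 87, 93, 99, 105, 108, 114, 120, 123, 126, 129]

-- ===== PORT A =====
def struc_code (atoms : List (Int × Int × Int × Int)) : List Int :=
  let all_bcodes : List Int :=
    atoms.foldl (fun acc (at_ : Int × Int × Int × Int) =>
      if at_.2.2.2 ≠ 132 ∧ at_.2.2.2 ≠ 53 then acc ++ [at_.2.2.2] else acc) []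
  let struct_code : List Int := [0, 0, 0, 0, 0, 0, 0, 0, 0, 0, 0, 0, 0, 0, 0, 0, 0, 0, 0, 0, 0, 0, 0, 0, 0, 0, 0, 0, 0]
  let bcodes : List Int := (PySem.Dict.counter all_bcodes).keys
  let bnums : List Int := (PySem.Dict.counter all_bcodes).values
  let final :=
    (PySem.List.pyRange 0 (PySem.List.len bcodes) 1).foldl
      (fun sc j =>
        -- try: index = UCCodes.index(bcodes[j]) ; except ValueError: index = -1
        let index : Int :=
          match PySem.List.index? UCCodes (PySem.List.pyGetD bcodes j 0) with
          | some n => (n : Int)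
          | none => -1
        if index ≥ 0 then PySem.List.pySetD sc index (PySem.List.pyGetD bnums j 0) else sc)
      struct_code
  final  -- list(struct_code) returns a copy, the same value

-- ===== PORT B =====
def struc_code_alt (atoms : List (Int × Int × Int × Int)) : List Int :=
  let pos : PySem.Dict Int Int :=
    (PySem.List.enumerate UCCodes 0).foldl (fun d p => d.insert p.2 p.1) PySem.Dict.empty
  atoms.foldl
    (fun sc (at_ : Int × Int × Int × Int) =>
      if at_.2.2.2 ≠ 132 ∧ at_.2.2.2 ≠ 53 then
        match pos.get? at_.2.2.2 with
        | some i => PySem.List.pySetD sc i (PySem.List.pyGetD sc i 0 + 1)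
        | none => sc
      else sc)
    (List.replicate 29 (0 : Int))

-- ===== PRECONDITION & SPEC =====
def Spec_struc_code (atoms : List (Int × Int × Int × Int)) (out : List Int) : Prop := out = struc_code_alt atoms
instance (atoms : List (Int × Int × Int × Int)) (out : List Int) : Decidable (Spec_struc_code atoms out) := by unfold Spec_struc_code; infer_instance

-- ===== CLAIM (what is proved, stated in full; the proofs are below) =====
def Claim_equal_struc_code : Prop := ∀ (atoms : List (Int × Int × Int × Int)), Dom_struc_code atoms → Spec_struc_code atoms (struc_code atoms)

-- ===== LEMMAS AND PROOFS =====

-- the filtered code list both programs count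
def pvCodes (atoms : List (Int × Int × Int × Int)) : List Int :=
  (atoms.filter (fun a => decide (a.2.2.2 ≠ 132 ∧ a.2.2.2 ≠ 53))).map (fun a => a.2.2.2)

theorem pvUC_len : UCCodes.length = 29 := by decide

theorem pvUC_nodup : UCCodes.Nodup := by decide

theorem pvUC_getD_mem (i : Nat) (hi : i < 29) : UCCodes.getD i 0 ∈ UCCodes := by
  rw [List.getD_eq_getElem _ _ (by rw [pvUC_len]; omega)]
  exact List.getElem_mem _

theorem pvUC_getD_inj (i n : Nat) (hi : i < 29) (hn : n < 29)
    (h : UCCodes.getD i 0 = UCCodes[n]'(by rw [pvUC_len]; omega)) : i = n := by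
  rw [List.getD_eq_getElem _ _ (by rw [pvUC_len]; omega)] at h
  exact pvUC_nodup.getElem_inj_iff.mp h

theorem pvRepGetD (i : Nat) : (List.replicate 29 (0 : Int)).getD i 0 = 0 := by
  rcases Nat.lt_or_ge i 29 with h | h
  · rw [List.getD_eq_getElem _ _ (by simpa using h)]
    exact List.getElem_replicate _
  · rw [List.getD_eq_default _ _ (by simpa using h)]

-- an index-driven fold over a list and its map is a fold over the list itself
theorem pvIdxFold (step : Int → Int → List Int → List Int) (g : Int → Int) :
    ∀ (ks : List Int) (z : List Int),
      (PySem.List.pyRange 0 (PySem.List.len ks) 1).foldl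
        (fun sc j => step (PySem.List.pyGetD ks j 0) (PySem.List.pyGetD (ks.map g) j 0) sc) z
      = ks.foldl (fun sc k => step k (g k) sc) z := by
  intro ks
  induction ks using List.reverseRecOn with
  | nil => intro z; simp [PySem.List.pyRange_one_eq_nil]
  | append_singleton ks k ih =>
    intro z
    simp only [PySem.List.len_eq] at ih ⊢
    rw [show ((ks ++ [k]).length : Int) = (ks.length : Int) + 1 by simp,
      PySem.List.pyRange_one_succ_right (by positivity), List.foldl_append, List.foldl_append]
    have hcongr :
        (PySem.List.pyRange 0 (ks.length : Int) 1).foldl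
          (fun sc j => step (PySem.List.pyGetD (ks ++ [k]) j 0) (PySem.List.pyGetD ((ks ++ [k]).map g) j 0) sc) z
        = (PySem.List.pyRange 0 (ks.length : Int) 1).foldl
          (fun sc j => step (PySem.List.pyGetD ks j 0) (PySem.List.pyGetD (ks.map g) j 0) sc) z := by
      apply PySem.List.foldl_congr_mem
      intro acc j hj
      rw [PySem.List.mem_pyRange_one] at hj
      have h0 : 0 ≤ j := hj.1
      have h1 : j.toNat < ks.length := by omega
      rw [PySem.List.pyGetD_of_nonneg _ _ h0, PySem.List.pyGetD_of_nonneg _ _ h0,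
        PySem.List.pyGetD_of_nonneg _ _ h0, PySem.List.pyGetD_of_nonneg _ _ h0]
      simp [List.getD, List.getElem?_append_left, h1]
    rw [hcongr, ih]
    simp only [List.foldl_cons, List.foldl_nil]
    have hk1 : PySem.List.pyGetD (ks ++ [k]) (ks.length : Int) 0 = k := by
      simp [List.getD]
    have hk2 : PySem.List.pyGetD ((ks ++ [k]).map g) (ks.length : Int) 0 = g k := by
      have h : (ks ++ [k]).map g = ks.map g ++ [g k] := by simp
      rw [h]
      have hl : (ks.map g).length = ks.length := by simp
      rw [← hl]
      simp [List.getD]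
    rw [hk1, hk2]

-- pvIdxFold specialised to A's loop body (term-level, beta-definitional)
theorem pvAIdx (g : Int → Int) (ks : List Int) (z : List Int) :
    (PySem.List.pyRange 0 (PySem.List.len ks) 1).foldl
      (fun sc j =>
        let index : Int :=
          match PySem.List.index? UCCodes (PySem.List.pyGetD ks j 0) with
          | some n => (n : Int)
          | none => -1
        if index ≥ 0 then PySem.List.pySetD sc index (PySem.List.pyGetD (ks.map g) j 0) else sc) z
    = ks.foldl
      (fun sc k =>
        let index : Int :=
          match PySem.List.index? UCCodes k with
          | some n => (n : Int)
          | none => -1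
        if index ≥ 0 then PySem.List.pySetD sc index (g k) else sc) z :=
  pvIdxFold
    (fun a b sc =>
      let index : Int :=
        match PySem.List.index? UCCodes a with
        | some n => (n : Int)
        | none => -1
      if index ≥ 0 then PySem.List.pySetD sc index b else sc) g ks z

-- placement-fold characterisation (A's second loop)
theorem pvPlace (g : Int → Int) :
    ∀ (ks : List Int) (z : List Int), z.length = 29 →
      (ks.foldl
        (fun sc k =>
          let index : Int :=
            match PySem.List.index? UCCodes k with
            | some n => (n : Int)
            | none => -1
          if index ≥ 0 then PySem.List.pySetD sc index (g k) else sc) z).length = 29 ∧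
      ∀ i, i < 29 →
        (ks.foldl
          (fun sc k =>
            let index : Int :=
              match PySem.List.index? UCCodes k with
              | some n => (n : Int)
              | none => -1
            if index ≥ 0 then PySem.List.pySetD sc index (g k) else sc) z).getD i 0
        = if UCCodes.getD i 0 ∈ ks then g (UCCodes.getD i 0) else z.getD i 0 := by
  intro ks
  induction ks with
  | nil => intro z hz; simp [hz]
  | cons k ks ih =>
    intro z hz
    rw [List.foldl_cons]
    rcases hidx : PySem.List.index? UCCodes k with _ | n
    · have hstep :
          (let index : Int :=
            match (none : Option Nat) with
            | some n => (n : Int)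
            | none => -1
          if index ≥ 0 then PySem.List.pySetD z index (g k) else z) = z := by
        norm_num
      rw [hstep]
      obtain ⟨hl, hp⟩ := ih z hz
      refine ⟨hl, fun i hi => ?_⟩
      rw [hp i hi]
      have hne : UCCodes.getD i 0 ≠ k := by
        intro he
        exact ((PySem.List.index?_eq_none_iff _ _).mp hidx) (he ▸ pvUC_getD_mem i hi)
      simp only [List.mem_cons]
      by_cases hm : UCCodes.getD i 0 ∈ ks
      · rw [if_pos hm, if_pos (Or.inr hm)]
      · rw [if_neg hm, if_neg (by tauto)]
    · obtain ⟨hn29, hkn, _⟩ := PySem.List.getElem_of_index?_eq_some hidx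
      rw [pvUC_len] at hn29
      have hstep :
          (let index : Int :=
            match (some n : Option Nat) with
            | some n => (n : Int)
            | none => -1
          if index ≥ 0 then PySem.List.pySetD z index (g k) else z) = z.set n (g k) := by
        simp only []
        rw [if_pos (by positivity)]
        exact PySem.List.pySetD_natCast z n (g k)
      rw [hstep]
      obtain ⟨hl, hp⟩ := ih (z.set n (g k)) (by simp [hz])
      refine ⟨hl, fun i hi => ?_⟩
      rw [hp i hi]
      simp only [List.mem_cons]
      have hiz : i < z.length := by omega
      have hisz : i < (z.set n (g k)).length := by simp [hz]; omega
      by_cases hm : UCCodes.getD i 0 ∈ ks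
      · rw [if_pos hm, if_pos (Or.inr hm)]
      · by_cases he : UCCodes.getD i 0 = k
        · have hin : i = n := pvUC_getD_inj i n hi hn29 (by rw [he, hkn])
          subst hin
          rw [if_neg hm, if_pos (Or.inl he), List.getD_eq_getElem _ _ hisz,
            List.getElem_set_self, he]
        · have hin : i ≠ n := by
            intro h
            subst h
            exact he (by rw [List.getD_eq_getElem _ _ (by rw [pvUC_len]; omega)]; exact hkn)
          rw [if_neg hm, if_neg (by tauto), List.getD_eq_getElem _ _ hisz,
            List.getD_eq_getElem _ _ hiz, List.getElem_set_ne (by omega)]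

-- the position dict built from enumerate(UCCodes) looks up like list.index
theorem pvPosGet :
    ∀ (us : List Int), us.Nodup → ∀ (s : Int) (d : PySem.Dict Int Int) (c : Int),
      ((PySem.List.enumerate us s).foldl (fun d p => d.insert p.2 p.1) d).get? c
      = match PySem.List.index? us c with
        | some n => some (s + (n : Int))
        | none => d.get? c := by
  intro us
  induction us with
  | nil =>
    intro _ s d c
    rw [(PySem.List.index?_eq_none_iff ([] : List Int) c).mpr (by simp)]
    simp [PySem.List.enumerate]
  | cons u us ih =>
    intro hnd s d c
    rw [PySem.List.enumerate_cons, List.foldl_cons]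
    rw [ih (List.Nodup.of_cons hnd) (s + 1) (d.insert u s) c]
    by_cases hc : c = u
    · subst hc
      rw [(PySem.List.index?_eq_none_iff us c).mpr (by simp at hnd; exact hnd.1),
        PySem.List.index?_cons_self]
      simp [PySem.Dict.get?_insert_self]
    · rw [PySem.List.index?_cons_of_ne us (fun h => hc h.symm)]
      rcases h2 : PySem.List.index? us c with _ | n
      · simp [PySem.Dict.get?_insert_of_ne d s hc]
      · simp only [Option.map_some]
        push_cast
        ring_nf

-- B's fold invariant: each slot accumulates the count of its UCCode
theorem pvBFold :
    ∀ (atoms : List (Int × Int × Int × Int)) (z : List Int), z.length = 29 →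
      (atoms.foldl
        (fun sc (at_ : Int × Int × Int × Int) =>
          if at_.2.2.2 ≠ 132 ∧ at_.2.2.2 ≠ 53 then
            match ((PySem.List.enumerate UCCodes 0).foldl (fun d p => d.insert p.2 p.1) PySem.Dict.empty).get? at_.2.2.2 with
            | some i => PySem.List.pySetD sc i (PySem.List.pyGetD sc i 0 + 1)
            | none => sc
          else sc) z).length = 29 ∧
      ∀ i, i < 29 →
        (atoms.foldl
          (fun sc (at_ : Int × Int × Int × Int) =>
            if at_.2.2.2 ≠ 132 ∧ at_.2.2.2 ≠ 53 then
              match ((PySem.List.enumerate UCCodes 0).foldl (fun d p => d.insert p.2 p.1) PySem.Dict.empty).get? at_.2.2.2 with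
              | some i => PySem.List.pySetD sc i (PySem.List.pyGetD sc i 0 + 1)
              | none => sc
            else sc) z).getD i 0
        = z.getD i 0 + ((pvCodes atoms).count (UCCodes.getD i 0) : Int) := by
  intro atoms
  induction atoms with
  | nil => intro z hz; exact ⟨hz, fun i hi => by simp [pvCodes]⟩
  | cons a rest ih =>
    intro z hz
    rw [List.foldl_cons]
    by_cases hp : a.2.2.2 ≠ 132 ∧ a.2.2.2 ≠ 53
    · have hcodes : pvCodes (a :: rest) = a.2.2.2 :: pvCodes rest := by
        simp [pvCodes, hp]
      have hget := pvPosGet UCCodes pvUC_nodup 0 PySem.Dict.empty a.2.2.2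
      rcases hidx : PySem.List.index? UCCodes a.2.2.2 with _ | n
      · rw [hidx] at hget
        simp only [PySem.Dict.get?_empty] at hget
        rw [if_pos hp]
        simp only [hget]
        obtain ⟨hl, hp2⟩ := ih z hz
        refine ⟨hl, fun i hi => ?_⟩
        rw [hp2 i hi, hcodes]
        have hne : a.2.2.2 ≠ UCCodes.getD i 0 := by
          intro he
          exact ((PySem.List.index?_eq_none_iff _ _).mp hidx) (he ▸ pvUC_getD_mem i hi)
        rw [List.count_cons,
          show (a.2.2.2 == UCCodes.getD i 0) = false from beq_eq_false_iff_ne.mpr hne]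
        simp
      · rw [hidx] at hget
        obtain ⟨hn29, hkn, _⟩ := PySem.List.getElem_of_index?_eq_some hidx
        rw [pvUC_len] at hn29
        rw [if_pos hp]
        simp only [hget, zero_add]
        have hstep : PySem.List.pySetD z (n : Int) (PySem.List.pyGetD z (n : Int) 0 + 1)
            = z.set n (z.getD n 0 + 1) := by
          rw [PySem.List.pySetD_natCast, PySem.List.pyGetD_natCast]
        rw [hstep]
        obtain ⟨hl, hp2⟩ := ih (z.set n (z.getD n 0 + 1)) (by simp [hz])
        refine ⟨hl, fun i hi => ?_⟩
        rw [hp2 i hi, hcodes, List.count_cons]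
        have hiz : i < z.length := by omega
        have hisz : i < (z.set n (z.getD n 0 + 1)).length := by simp [hz]; omega
        by_cases hin : i = n
        · subst hin
          have he : UCCodes.getD i 0 = a.2.2.2 := by
            rw [List.getD_eq_getElem _ _ (by rw [pvUC_len]; omega)]
            exact hkn
          rw [List.getD_eq_getElem _ _ hisz, List.getElem_set_self,
            show (a.2.2.2 == UCCodes.getD i 0) = true from beq_iff_eq.mpr he.symm]
          push_cast
          simp
          ring
        · have hne : a.2.2.2 ≠ UCCodes.getD i 0 := fun he =>
            hin (pvUC_getD_inj i n hi hn29 (he.symm.trans hkn.symm))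
          rw [List.getD_eq_getElem _ _ hisz, List.getElem_set_ne (by omega),
            ← List.getD_eq_getElem z (0 : Int) hiz,
            show (a.2.2.2 == UCCodes.getD i 0) = false from beq_eq_false_iff_ne.mpr hne]
          simp
    · have hcodes : pvCodes (a :: rest) = pvCodes rest := by
        simp only [pvCodes, List.filter_cons]
        rw [if_neg (by simpa using hp)]
      rw [if_neg hp, hcodes]
      exact ih z hz

theorem pvA_char (atoms : List (Int × Int × Int × Int)) :
    (struc_code atoms).length = 29 ∧
    ∀ i, i < 29 → (struc_code atoms).getD i 0 = ((pvCodes atoms).count (UCCodes.getD i 0) : Int) := by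
  have hAB : atoms.foldl (fun acc (at_ : Int × Int × Int × Int) =>
      if at_.2.2.2 ≠ 132 ∧ at_.2.2.2 ≠ 53 then acc ++ [at_.2.2.2] else acc) [] = pvCodes atoms := by
    rw [PySem.List.foldl_append_ite]
    rfl
  have hvals : (PySem.Dict.counter (pvCodes atoms)).values
      = (PySem.Set.ofList (pvCodes atoms)).map (fun k => ((pvCodes atoms).count k : Int)) := by
    rw [PySem.Dict.values_eq_map_keys _ (PySem.Dict.nodup_keys_counter _) 0,
      PySem.Dict.keys_counter]
    exact List.map_congr_left (fun k _ => PySem.Dict.getD_counter _ k)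
  have main : struc_code atoms
      = (PySem.Set.ofList (pvCodes atoms)).foldl
          (fun sc k =>
            let index : Int :=
              match PySem.List.index? UCCodes k with
              | some n => (n : Int)
              | none => -1
            if index ≥ 0 then PySem.List.pySetD sc index ((fun k => ((pvCodes atoms).count k : Int)) k) else sc)
          [0, 0, 0, 0, 0, 0, 0, 0, 0, 0, 0, 0, 0, 0, 0, 0, 0, 0, 0, 0, 0, 0, 0, 0, 0, 0, 0, 0, 0] := by
    simp only [struc_code]
    rw [hAB, hvals, PySem.Dict.keys_counter, pvAIdx]
  obtain ⟨hl, hp⟩ := pvPlace (fun k => ((pvCodes atoms).count k : Int))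
    (PySem.Set.ofList (pvCodes atoms))
    [0, 0, 0, 0, 0, 0, 0, 0, 0, 0, 0, 0, 0, 0, 0, 0, 0, 0, 0, 0, 0, 0, 0, 0, 0, 0, 0, 0, 0] (by decide)
  refine ⟨by rw [main]; exact hl, fun i hi => ?_⟩
  rw [main, hp i hi]
  by_cases hm : UCCodes.getD i 0 ∈ pvCodes atoms
  · rw [if_pos ((PySem.Set.mem_ofList _ _).mpr hm)]
  · rw [if_neg (fun h => hm ((PySem.Set.mem_ofList _ _).mp h)),
      show ((pvCodes atoms).count (UCCodes.getD i 0)) = 0 from List.count_eq_zero.mpr hm]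
    have hz : ([0, 0, 0, 0, 0, 0, 0, 0, 0, 0, 0, 0, 0, 0, 0, 0, 0, 0, 0, 0, 0, 0, 0, 0, 0, 0, 0, 0, 0] : List Int)
        = List.replicate 29 0 := rfl
    rw [hz, pvRepGetD i]
    simp

theorem pvB_char (atoms : List (Int × Int × Int × Int)) :
    (struc_code_alt atoms).length = 29 ∧
    ∀ i, i < 29 → (struc_code_alt atoms).getD i 0 = ((pvCodes atoms).count (UCCodes.getD i 0) : Int) := by
  obtain ⟨hl, hp⟩ := pvBFold atoms (List.replicate 29 (0 : Int)) (by simp)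
  have main : struc_code_alt atoms
      = atoms.foldl
          (fun sc (at_ : Int × Int × Int × Int) =>
            if at_.2.2.2 ≠ 132 ∧ at_.2.2.2 ≠ 53 then
              match ((PySem.List.enumerate UCCodes 0).foldl (fun d p => d.insert p.2 p.1) PySem.Dict.empty).get? at_.2.2.2 with
              | some i => PySem.List.pySetD sc i (PySem.List.pyGetD sc i 0 + 1)
              | none => sc
            else sc) (List.replicate 29 (0 : Int)) := rfl
  refine ⟨by rw [main]; exact hl, fun i hi => ?_⟩
  rw [main, hp i hi, pvRepGetD i]
  simp

-- ===== VERDICT (by name: the statement is the Claim_ definition above) =====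
theorem struc_code_spec : Claim_equal_struc_code := by
  intro atoms _
  unfold Spec_struc_code
  obtain ⟨hAl, hA⟩ := pvA_char atoms
  obtain ⟨hBl, hB⟩ := pvB_char atoms
  apply List.ext_getElem (by omega)
  intro i h1 h2
  have hi : i < 29 := by omega
  have h := (hA i hi).trans (hB i hi).symm
  rwa [List.getD_eq_getElem _ _ (by omega), List.getD_eq_getElem _ _ (by omega)] at h
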